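-- pv_equiv track=rewrite | github.com/lipingzhu/PythonEdX | final.py | reverse_dictionary
-- ===== SOURCE A (Python) =====
-- def reverse_dictionary(input_dict):
--     new_dict = {}
--     new_keylist = list(new_dict.keys())
--     inp_keylist = list(input_dict.keys())
--     new_vallist = []
--
--     for item in inp_keylist:
--         inp_vallist = input_dict[item]
-- #        print ("input key ", item, inp_vallist)
--         for valitem in inp_vallist:
--             new_vallist = []
--             if new_keylist.count(valitem.lower()) == 0:
--                 new_keylist.append(valitem.lower())
--                 new_vallist.append(item.lower())
--                 new_dict[valitem.lower()] = new_vallist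
--                 #print ("new key ", valitem, new_vallist)
--             else:
-- #                new_dict[valitem].extend(new_vallist)
--                 new_dict[valitem.lower()].append(item.lower())
--                 new_dict[valitem.lower()].sort()
--                 #print ("after", new_dict[valitem])
--
--         #print (new_dict)
--
--     return (new_dict)
-- ===== SOURCE B (Python) =====
-- def reverse_dictionary(input_dict):
--     # Collect a flat index of (value.lower(), key.lower()) pairs, pre-create the
--     # groups in first-appearance order, sort the whole index once by key (stable),
--     # then distribute each key into its group in a single pass.
--     pairs = [(v.lower(), k.lower()) for k, vs in input_dict.items() for v in vs]
--     new_dict = {v: [] for v, _ in pairs}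
--     for v, k in sorted(pairs, key=lambda p: p[1]):
--         new_dict[v].append(k)
--     return new_dict
-- ===== Notes on version B (the rewrite author's own statement) =====
-- stated objective: faster
-- what changed: B builds one flat list of (lowered value, lowered key) pairs, pre-creates the groups with a dict comprehension, sorts the whole pair list once by key (stable) and distributes it in a single pass, instead of A's per-pair count-scan over a growing key list and full re-sort of the group after every single append.
import Mathlib
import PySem

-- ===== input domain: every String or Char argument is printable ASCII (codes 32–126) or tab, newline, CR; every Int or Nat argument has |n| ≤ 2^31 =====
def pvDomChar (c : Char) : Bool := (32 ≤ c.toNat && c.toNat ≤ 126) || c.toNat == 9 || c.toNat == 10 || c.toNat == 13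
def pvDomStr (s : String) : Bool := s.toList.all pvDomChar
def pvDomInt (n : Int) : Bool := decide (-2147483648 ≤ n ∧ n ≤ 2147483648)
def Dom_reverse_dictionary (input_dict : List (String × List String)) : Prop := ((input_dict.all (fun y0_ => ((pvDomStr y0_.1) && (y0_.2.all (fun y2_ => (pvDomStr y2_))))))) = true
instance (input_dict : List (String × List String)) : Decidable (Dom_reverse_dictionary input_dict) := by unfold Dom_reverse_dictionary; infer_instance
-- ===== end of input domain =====

-- B collects a flat (lowered value, lowered key) pair index, pre-creates the groups,
-- sorts the whole index once by key and distributes it in one pass, instead of A's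
-- per-pair count-scan over a growing key list and re-sort of the group after every append.
-- (A mutates lists held in its dict in place; the equivalence proved is about the return value.)


-- ===== PORT A =====
def reverse_dictionary (input_dict : List (String × List String)) : List (String × List String) :=
  let d := PySem.Dict.ofList input_dict
  let st := d.keys.foldl
    (fun (st : PySem.Dict String (List String) × List String) item =>
      -- inp_vallist = input_dict[item]; item comes from input_dict.keys() so the lookup
      -- always succeeds, getD with [] is exact here
      let inp_vallist := d.getD item []
      inp_vallist.foldl
        (fun st valitem =>
          if st.2.count (PySem.Str.lower valitem) = 0 then
            (st.1.insert (PySem.Str.lower valitem) [PySem.Str.lower item],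
             st.2 ++ [PySem.Str.lower valitem])
          else
            (st.1.modify (PySem.Str.lower valitem) []
               (fun l => PySem.List.sorted (l ++ [PySem.Str.lower item]) (fun x => x)),
             st.2))
        st)
    (PySem.Dict.empty, [])
  st.1.items

-- ===== PORT B =====
def reverse_dictionary_alt (input_dict : List (String × List String)) : List (String × List String) :=
  let d := PySem.Dict.ofList input_dict
  -- pairs = [(v.lower(), k.lower()) for k, vs in input_dict.items() for v in vs]
  let pairs := d.items.flatMap (fun q => q.2.map (fun v => (PySem.Str.lower v, PySem.Str.lower q.1)))
  -- new_dict = {v: [] for v, _ in pairs}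
  let init := pairs.foldl
    (fun (g : PySem.Dict String (List String)) p => g.insert p.1 ([] : List String))
    PySem.Dict.empty
  -- for v, k in sorted(pairs, key=lambda p: p[1]): new_dict[v].append(k)
  -- (v is always a key of new_dict, so modify with default [] is exact)
  let final := (PySem.List.sorted pairs (fun p => p.2)).foldl
    (fun (g : PySem.Dict String (List String)) p => g.modify p.1 [] (· ++ [p.2]))
    init
  final.items

-- ===== PRECONDITION & SPEC =====
def Spec_reverse_dictionary (input_dict : List (String × List String)) (out : List (String × List String)) : Prop := out = reverse_dictionary_alt input_dict
instance (input_dict : List (String × List String)) (out : List (String × List String)) : Decidable (Spec_reverse_dictionary input_dict out) := by unfold Spec_reverse_dictionary; infer_instance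

-- ===== CLAIM (what is proved, stated in full; the proofs are below) =====
def Claim_equal_reverse_dictionary : Prop := ∀ (input_dict : List (String × List String)), Dom_reverse_dictionary input_dict → Spec_reverse_dictionary input_dict (reverse_dictionary input_dict)

-- ===== LEMMAS AND PROOFS =====

-- A's per-pair step, on the flattened (lowered value, lowered key) pair stream
def pvStepA (st : PySem.Dict String (List String) × List String) (p : String × String) :
    PySem.Dict String (List String) × List String :=
  if st.2.count p.1 = 0 then
    (st.1.insert p.1 [p.2], st.2 ++ [p.1])
  else
    (st.1.modify p.1 [] (fun l => PySem.List.sorted (l ++ [p.2]) (fun x => x)), st.2)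

-- the plain append-grouping step (proof intermediate between A and B)
def pvStepB (g : PySem.Dict String (List String)) (p : String × String) :
    PySem.Dict String (List String) :=
  g.modify p.1 [] (fun l => l ++ [p.2])

-- the flattened pair stream
def pvPairs (items : List (String × List String)) : List (String × String) :=
  items.flatMap (fun q => q.2.map (fun v => (PySem.Str.lower v, PySem.Str.lower q.1)))

lemma pvFlatten {σ : Type} (items : List (String × List String)) (f : σ → String × String → σ)
    (init : σ) :
    items.foldl
      (fun st q => q.2.foldl (fun st v => f st (PySem.Str.lower v, PySem.Str.lower q.1)) st) init
    = (pvPairs items).foldl f init := by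
  induction items generalizing init with
  | nil => rfl
  | cons q rest ih =>
    simp [pvPairs, List.flatMap_cons, List.foldl_append, List.foldl_map] at *
    rw [ih]

-- sorting again after appending one element to an already-sorted list
lemma pvSortedAppend (l : List String) (k : String) :
    PySem.List.sorted (PySem.List.sorted l (fun x => x) ++ [k]) (fun x => x)
    = PySem.List.sorted (l ++ [k]) (fun x => x) := by
  exact PySem.List.sorted_eq_sorted_of_perm _ _ _ (fun a b h => h)
    ((PySem.List.sorted_perm l (fun x => x) false).append_right [k])

-- invariant through the flattened stream: A's dict is the append-grouping dict with each
-- group sorted, A's key list is its dict's key list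
lemma pvInv (L : List (String × String)) (dA dB : PySem.Dict String (List String))
    (kl : List String)
    (h1 : kl = dA.keys) (h2 : dA.keys = dB.keys) (h3 : dB.keys.Nodup)
    (h4 : ∀ v, dA.getD v [] = PySem.List.sorted (dB.getD v []) (fun x => x)) :
    (L.foldl pvStepA (dA, kl)).2 = (L.foldl pvStepA (dA, kl)).1.keys ∧
    (L.foldl pvStepA (dA, kl)).1.keys = (L.foldl pvStepB dB).keys ∧
    (L.foldl pvStepB dB).keys.Nodup ∧
    ∀ v, (L.foldl pvStepA (dA, kl)).1.getD v []
        = PySem.List.sorted ((L.foldl pvStepB dB).getD v []) (fun x => x) := by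
  induction L generalizing dA dB kl with
  | nil => exact ⟨h1, h2, h3, h4⟩
  | cons p rest ih =>
    simp only [List.foldl_cons]
    by_cases hmem : p.1 ∈ dA.keys
    · -- existing value: both modify
      have hcA : dA.contains p.1 = true := (PySem.Dict.contains_iff_mem_keys dA p.1).mpr hmem
      have hcB : dB.contains p.1 = true :=
        (PySem.Dict.contains_iff_mem_keys dB p.1).mpr (h2 ▸ hmem)
      have hcnt : ¬ kl.count p.1 = 0 := by
        rw [List.count_eq_zero]; subst h1; exact fun h => h hmem
      have hstep : pvStepA (dA, kl) p
          = (dA.modify p.1 [] (fun l => PySem.List.sorted (l ++ [p.2]) (fun x => x)), kl) := by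
        simp [pvStepA, hcnt]
      rw [hstep]
      apply ih
      · rw [h1, PySem.Dict.keys_modify, PySem.Dict.keys_insert_of_contains _ _ hcA]
      · rw [PySem.Dict.keys_modify, PySem.Dict.keys_insert_of_contains _ _ hcA,
            pvStepB, PySem.Dict.keys_modify, PySem.Dict.keys_insert_of_contains _ _ hcB, h2]
      · rw [pvStepB, PySem.Dict.keys_modify, PySem.Dict.keys_insert_of_contains _ _ hcB]
        exact h3
      · intro v
        rw [PySem.Dict.getD_modify, pvStepB, PySem.Dict.getD_modify]
        by_cases hv : v = p.1
        · rw [hv, if_pos rfl, if_pos rfl, h4 p.1, pvSortedAppend]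
        · simp only [if_neg hv]; exact h4 v
    · -- fresh value: A inserts, the grouping step's modify appends
      have hcA : dA.contains p.1 = false := by
        rw [← Bool.not_eq_true, PySem.Dict.contains_iff_mem_keys]; exact hmem
      have hcB : dB.contains p.1 = false := by
        rw [← Bool.not_eq_true, PySem.Dict.contains_iff_mem_keys]; rw [← h2]; exact hmem
      have hcnt : kl.count p.1 = 0 := by rw [List.count_eq_zero]; subst h1; exact hmem
      have hstep : pvStepA (dA, kl) p = (dA.insert p.1 [p.2], kl ++ [p.1]) := by
        simp [pvStepA, hcnt]
      rw [hstep]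
      apply ih
      · rw [h1, PySem.Dict.keys_insert_of_not_contains _ _ hcA]
      · rw [PySem.Dict.keys_insert_of_not_contains _ _ hcA,
            pvStepB, PySem.Dict.keys_modify, PySem.Dict.keys_insert_of_not_contains _ _ hcB, h2]
      · rw [pvStepB, PySem.Dict.keys_modify, PySem.Dict.keys_insert_of_not_contains _ _ hcB]
        exact List.Nodup.append h3 (List.nodup_singleton _)
          (by simpa using fun h => by rw [← h2] at h; exact hmem h)
      · intro v
        rw [PySem.Dict.getD_insert, pvStepB, PySem.Dict.getD_modify]
        by_cases hv : v = p.1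
        · rw [hv, if_pos rfl, if_pos rfl, PySem.Dict.getD_of_not_contains _ _ hcB]
          exact (PySem.List.sorted_eq_self_of_pairwise _ _ (List.pairwise_singleton _ _)).symm
        · simp only [if_neg hv]; exact h4 v

-- the append-grouping fold over any pair list computes the filtered projection
lemma pvGroupGetD (L : List (String × String)) (v : String) :
    ((L.foldl pvStepB PySem.Dict.empty).getD v [])
    = (L.filter (fun p => p.1 == v)).map (fun p => p.2) := by
  show ((L.foldl (fun (d : PySem.Dict String (List String)) p =>
      d.modify p.1 [] (· ++ [p.2])) PySem.Dict.empty).getD v []) = _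
  rw [PySem.Dict.getD_foldl_modify_append]
  simp [pysem]

-- the dict-comprehension init has value [] everywhere
lemma pvInitGetD (L : List (String × String)) (g : PySem.Dict String (List String))
    (h : ∀ w, g.getD w [] = ([] : List String)) (v : String) :
    ((L.foldl (fun (g : PySem.Dict String (List String)) p =>
        g.insert p.1 ([] : List String)) g).getD v []) = [] := by
  induction L generalizing g with
  | nil => exact h v
  | cons p rest ih =>
    simp only [List.foldl_cons]
    apply ih
    intro w
    rw [PySem.Dict.getD_insert]
    split_ifs with hw
    · rfl
    · exact h w

-- a stable sort by the second component, filtered on the first and projected to the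
-- second, is the sort of the filtered projection
lemma pvSortFilter (P : List (String × String)) (v : String) :
    (((PySem.List.sorted P (fun p => p.2)).filter (fun p => p.1 == v)).map (fun p => p.2))
    = PySem.List.sorted ((P.filter (fun p => p.1 == v)).map (fun p => p.2)) (fun x => x) := by
  refine (PySem.List.sorted_id_eq_of_perm_of_pairwise _ _ ?_ ?_).symm
  · exact ((PySem.List.sorted_perm P (fun p => p.2) false).filter _).map _
  · exact (List.pairwise_map).mpr
      ((PySem.List.sorted_pairwise P (fun p => p.2)).sublist List.filter_sublist)

-- ===== VERDICT (by name: the statement is the Claim_ definition above) =====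
theorem reverse_dictionary_spec : Claim_equal_reverse_dictionary := by
  intro input_dict _
  unfold Spec_reverse_dictionary reverse_dictionary reverse_dictionary_alt
  set d := PySem.Dict.ofList input_dict with hd
  have hnd : d.keys.Nodup := PySem.Dict.nodup_keys_ofList input_dict
  have hitems : d.items = d.keys.map (fun k => (k, d.getD k [])) :=
    PySem.Dict.items_eq_map_keys d hnd []
  set P := pvPairs d.items with hP
  -- A's nested fold over keys = fold of pvStepA over the flattened pair stream
  have hA : d.keys.foldl
      (fun (st : PySem.Dict String (List String) × List String) item =>
        (d.getD item []).foldl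
          (fun st valitem =>
            if st.2.count (PySem.Str.lower valitem) = 0 then
              (st.1.insert (PySem.Str.lower valitem) [PySem.Str.lower item],
               st.2 ++ [PySem.Str.lower valitem])
            else
              (st.1.modify (PySem.Str.lower valitem) []
                 (fun l => PySem.List.sorted (l ++ [PySem.Str.lower item]) (fun x => x)),
               st.2))
          st)
      (PySem.Dict.empty, [])
      = P.foldl pvStepA (PySem.Dict.empty, []) := by
    rw [hP, ← pvFlatten d.items pvStepA, hitems, List.foldl_map]
    rfl
  simp only [hA]
  -- B's pair list is P
  show (P.foldl pvStepA (PySem.Dict.empty, [])).1.items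
      = ((PySem.List.sorted P (fun p => p.2)).foldl
          (fun (g : PySem.Dict String (List String)) p => g.modify p.1 [] (· ++ [p.2]))
          (P.foldl (fun (g : PySem.Dict String (List String)) p =>
            g.insert p.1 ([] : List String)) PySem.Dict.empty)).items
  set S := PySem.List.sorted P (fun p => p.2) with hS
  set init := P.foldl (fun (g : PySem.Dict String (List String)) p =>
      g.insert p.1 ([] : List String)) PySem.Dict.empty with hinit
  set final := S.foldl (fun (g : PySem.Dict String (List String)) p =>
      g.modify p.1 [] (· ++ [p.2])) init with hfinal
  -- A's result via the invariant, against the append-grouping dict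
  obtain ⟨-, hkeys, hndB, hgetD⟩ :=
    pvInv P PySem.Dict.empty PySem.Dict.empty []
      (by simp [pysem]) rfl (by simp [pysem])
      (by intro v; simp [pysem])
  -- keys of the grouping dict / of init / of final all equal Set.ofList (P.map (·.1))
  have hkG : (P.foldl pvStepB PySem.Dict.empty).keys = PySem.Set.ofList (P.map (fun p => p.1)) := by
    have h := PySem.Dict.keys_foldl_modify_key P (fun p => p.1) ([] : List String)
      (fun _ p l => l ++ [p.2]) PySem.Dict.empty
    rw [PySem.Dict.keys_empty, PySem.Set.update_nil_left] at h
    exact h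
  have hkInit : init.keys = PySem.Set.ofList (P.map (fun p => p.1)) := by
    have h := PySem.Dict.keys_foldl_insert_key P (fun p => p.1)
      (fun _ _ => ([] : List String)) PySem.Dict.empty
    rw [PySem.Dict.keys_empty, PySem.Set.update_nil_left] at h
    rw [hinit]
    exact h
  have hSf : ∀ x ∈ S.map (fun p => p.1), x ∈ init.keys := by
    intro x hx
    rw [hkInit]
    rw [PySem.Set.mem_ofList]
    obtain ⟨p, hp, rfl⟩ := List.mem_map.mp hx
    exact List.mem_map_of_mem (PySem.List.sorted_perm P (fun p => p.2) false |>.subset hp)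
  have hkFinal : final.keys = init.keys := by
    have h := PySem.Dict.keys_foldl_modify_key S (fun p => p.1) ([] : List String)
      (fun _ p l => l ++ [p.2]) init
    have h2 : final.keys = PySem.Set.update init.keys (S.map (fun p => p.1)) := by
      rw [hfinal]
      exact h
    rw [h2, PySem.Set.update_eq_append_filter]
    rw [List.filter_eq_nil_iff.mpr, List.append_nil]
    intro y hy
    have hmemk : y ∈ init.keys := hSf y (by simpa [PySem.Set.mem_ofList] using hy)
    simp [PySem.Set.contains_eq_listContains, hmemk]
  -- values of final: sorted projection of the filtered pair stream
  have hgFinal : ∀ v, final.getD v []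
      = (S.filter (fun p => p.1 == v)).map (fun p => p.2) := by
    intro v
    rw [hfinal, PySem.Dict.getD_foldl_modify_append, pvInitGetD P PySem.Dict.empty
        (by intro w; simp [pysem]) v, List.nil_append]
  have hndF : final.keys.Nodup := by rw [hkFinal, hkInit]; exact PySem.Set.nodup_ofList _
  -- assemble: same keys, same values
  have hkeysEq : (P.foldl pvStepA (PySem.Dict.empty, [])).1.keys = final.keys := by
    rw [hkeys, hkG, hkFinal, hkInit]
  rw [PySem.Dict.items_eq_map_keys _ (hkeysEq ▸ hndF) ([] : List String),
      PySem.Dict.items_eq_map_keys _ hndF ([] : List String), hkeysEq]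
  apply List.map_congr_left
  intro k _
  rw [hgetD k, pvGroupGetD P k, hgFinal k, hS, pvSortFilter]
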